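-- pv_equiv track=rewrite | github.com/DionGR/university-projects | Semester_1/Python/Weekly Homework/hw1.py | min_digit
-- ===== SOURCE A (Python) =====
-- def min_digit(x):
--     """Ypologizei to mikrotero pshfio tou x
--
--     x -- 8etikos akeraios
--
--     >>> min_digit(45874543)
--     3
--     >>> min_digit(98287334) - min_digit(8)
--     -6
--     """
--     """ GRAPSTE TON KWDIKA SAS APO KATW """
--     min = 10
--     for i in range(len(str(x))):
--         current = x % 10
--         if current < min:
--             min = current
--         x = x//10
--     return min
-- ===== SOURCE B (Python) =====
-- def min_digit(x):
--     """Smallest decimal digit of x (positive integer): scan the characters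
--     of the decimal string instead of extracting digits with % and //."""
--     return min(int(c) for c in str(x))
-- ===== Notes on version B (the rewrite author's own statement) =====
-- stated objective: idiomatic
-- what changed: B replaces A's arithmetic digit extraction (%10 // 10 loop with a running minimum seeded at 10) by a single min() over the characters of str(x) converted with int().
-- outside the precondition, e.g. on min_digit(-5): A returns 5, B raises ValueError
import Mathlib
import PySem

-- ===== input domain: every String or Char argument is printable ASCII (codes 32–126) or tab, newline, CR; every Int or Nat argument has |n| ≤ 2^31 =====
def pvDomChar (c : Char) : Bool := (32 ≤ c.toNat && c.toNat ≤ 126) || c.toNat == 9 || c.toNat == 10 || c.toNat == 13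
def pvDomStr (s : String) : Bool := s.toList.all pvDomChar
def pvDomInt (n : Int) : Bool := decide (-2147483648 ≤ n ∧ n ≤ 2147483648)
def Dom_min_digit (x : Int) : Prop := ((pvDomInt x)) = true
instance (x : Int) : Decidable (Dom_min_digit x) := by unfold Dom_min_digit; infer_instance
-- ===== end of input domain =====

-- B computes the same minimal decimal digit by scanning the characters of str(x)
-- with min(int(c) ...) instead of A's %10 // 10 extraction loop (idiomatic rewrite).


-- ===== PORT A =====
-- min = 10; for i in range(len(str(x))): current = x % 10; if current < min: min = current; x = x // 10
def min_digit (x : Int) : Int :=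
  ((PySem.List.pyRange 0 ((PySem.Int.toChars x).length : Int) 1).foldl
    (fun (st : Int × Int) _i =>
      let current := PySem.Int.mod st.2 10
      ((if current < st.1 then current else st.1), PySem.Int.floordiv st.2 10))
    (10, x)).1

-- ===== PORT B =====
-- int(c) for a single character; under Pre_ every character of str(x) is a digit,
-- so ofChars? is always `some` and the default is never reached
def pyDigitVal (c : Char) : Int := (PySem.Int.ofChars? [c]).getD 0

-- min(int(c) for c in str(x)); under Pre_ str(x) is nonempty, so min? is `some`
def min_digit_alt (x : Int) : Int :=
  (PySem.List.min? ((PySem.Int.toChars x).map pyDigitVal) id).getD 0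

-- ===== PRECONDITION & SPEC =====
-- Pre_ excludes negative x (outside A's documented positive domain): there A's value is an
-- artefact of floor-mod looping over len(str(x)) including the '-' sign, while B raises ValueError.
def Pre_min_digit (x : Int) : Prop := 0 ≤ x
instance (x : Int) : Decidable (Pre_min_digit x) := by unfold Pre_min_digit; infer_instance
def pvWitness_min_digit : Int := 45874543

def Spec_min_digit (x : Int) (out : Int) : Prop := out = min_digit_alt x
instance (x : Int) (out : Int) : Decidable (Spec_min_digit x out) := by unfold Spec_min_digit; infer_instance

-- ===== CLAIM (what is proved, stated in full; the proofs are below) =====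
def Claim_equal_min_digit : Prop := ∀ (x : Int), Dom_min_digit x → Pre_min_digit x → Spec_min_digit x (min_digit x)

-- ===== LEMMAS AND PROOFS =====

-- A's loop body as a step function on the state (min, x)
def aStep (st : Int × Int) : Int × Int :=
  let current := PySem.Int.mod st.2 10
  ((if current < st.1 then current else st.1), PySem.Int.floordiv st.2 10)

lemma foldl_const_iterate {α β : Type} (g : α → α) (l : List β) (init : α) :
    l.foldl (fun st _ => g st) init = g^[l.length] init := by
  induction l generalizing init with
  | nil => rfl
  | cons b l ih => simp [List.foldl_cons, ih, Function.iterate_succ_apply]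

lemma min_digit_eq_iterate (x : Int) :
    min_digit x = (aStep^[(PySem.Int.toChars x).length] (10, x)).1 := by
  unfold min_digit
  rw [show (fun (st : Int × Int) (_i : Int) =>
      let current := PySem.Int.mod st.2 10
      ((if current < st.1 then current else st.1), PySem.Int.floordiv st.2 10))
      = (fun st _ => aStep st) from rfl]
  rw [foldl_const_iterate, PySem.List.length_pyRange_one]
  simp

lemma ite_lt_eq_min (c m : Int) : (if c < m then c else m) = min c m := by
  rw [min_def]; split_ifs <;> omega

lemma aStep_natCast (n : Nat) (m : Int) :
    aStep (m, (n : Int)) = (min ((n % 10 : Nat) : Int) m, ((n / 10 : Nat) : Int)) := by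
  have h1 : PySem.Int.mod (n : Int) 10 = ((n % 10 : Nat) : Int) := by
    exact_mod_cast PySem.Int.mod_natCast n 10
  have h2 : PySem.Int.floordiv (n : Int) 10 = ((n / 10 : Nat) : Int) := by
    exact_mod_cast PySem.Int.floordiv_natCast n 10
  simp only [aStep, h1, h2, ite_lt_eq_min]

lemma toDigitsCore_acc (f : Nat) : ∀ (n : Nat) (acc : List Char),
    Nat.toDigitsCore 10 f n acc = Nat.toDigitsCore 10 f n [] ++ acc := by
  induction f with
  | zero => intro n acc; simp [Nat.toDigitsCore]
  | succ f ih =>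
    intro n acc
    simp only [Nat.toDigitsCore]
    by_cases h : n / 10 = 0
    · simp [h]
    · simp only [h, if_false]
      rw [ih (n / 10) ((n % 10).digitChar :: acc), ih (n / 10) [(n % 10).digitChar]]
      simp

lemma toDigitsCore_fuel (f : Nat) : ∀ (f' n : Nat) (acc : List Char), n < f → n < f' →
    Nat.toDigitsCore 10 f n acc = Nat.toDigitsCore 10 f' n acc := by
  induction f with
  | zero => intro f' n acc h _; omega
  | succ f ih =>
    intro f' n acc h h'
    cases f' with
    | zero => omega
    | succ f' =>
      simp only [Nat.toDigitsCore]
      by_cases h0 : n / 10 = 0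
      · simp [h0]
      · simp only [h0, if_false]
        exact ih f' (n / 10) _ (by omega) (by omega)

lemma toDigits_small (n : Nat) (h : n < 10) : Nat.toDigits 10 n = [Nat.digitChar n] := by
  unfold Nat.toDigits
  simp [Nat.toDigitsCore, Nat.div_eq_of_lt h, Nat.mod_eq_of_lt h]

lemma toDigits_step (n : Nat) (h : 10 ≤ n) :
    Nat.toDigits 10 n = Nat.toDigits 10 (n / 10) ++ [Nat.digitChar (n % 10)] := by
  unfold Nat.toDigits
  have h0 : n / 10 ≠ 0 := by omega
  conv_lhs => rw [show n + 1 = (n : Nat) + 1 from rfl]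
  simp only [Nat.toDigitsCore, h0, if_false]
  rw [toDigitsCore_acc, toDigitsCore_fuel n (n / 10 + 1) (n / 10) [] (by omega) (by omega)]
  simp only [Nat.toDigitsCore]

lemma pyDigitVal_digitChar (k : Nat) (h : k < 10) :
    pyDigitVal (Nat.digitChar k) = (k : Int) := by
  interval_cases k <;> decide

lemma foldl_min_comm (l : List Int) : ∀ (a m : Int),
    l.foldl min (min a m) = min a (l.foldl min m) := by
  induction l with
  | nil => intro a m; rfl
  | cons c l ih =>
    intro a m
    simp only [List.foldl_cons]
    rw [min_assoc, ih]

lemma min?_cons (a : Int) (l : List Int) :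
    PySem.List.min? (a :: l) id = some (l.foldl min a) := by
  induction l generalizing a with
  | nil => rfl
  | cons c l ih =>
    have h1 : PySem.List.min? (a :: c :: l) id
        = PySem.List.min? ((if c < a then c else a) :: l) id := by
      simp only [PySem.List.min?, List.foldl_cons, id]
      split_ifs <;> rfl
    have h2 : (if c < a then c else a) = min a c := by
      split_ifs with h
      · exact (min_eq_right h.le).symm
      · exact (min_eq_left (not_lt.1 h)).symm
    rw [h1, ih, h2, List.foldl_cons]

-- main loop characterisation: A's iterate over n's digits = foldl min over the digit values of str(n)
lemma loop_min (n : Nat) : ∀ (m : Int),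
    (aStep^[(Nat.toDigits 10 n).length] (m, (n : Int))).1
      = ((Nat.toDigits 10 n).map pyDigitVal).foldl min m := by
  induction n using Nat.strong_induction_on with
  | _ n ih =>
    intro m
    by_cases h : n < 10
    · rw [toDigits_small n h]
      show (aStep^[1] (m, (n : Int))).1 = ([Nat.digitChar n].map pyDigitVal).foldl min m
      rw [Function.iterate_one, aStep_natCast, Nat.mod_eq_of_lt h]
      simp only [List.map_cons, List.map_nil, List.foldl_cons, List.foldl_nil,
        pyDigitVal_digitChar n h]
      exact min_comm _ _
    · rw [toDigits_step n (by omega)]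
      have hlt : n / 10 < n := Nat.div_lt_self (by omega) (by omega)
      have hm : n % 10 < 10 := Nat.mod_lt _ (by omega)
      simp only [List.length_append, List.length_cons, List.length_nil, List.map_append,
        List.map_cons, List.map_nil, List.foldl_append, List.foldl_cons, List.foldl_nil]
      rw [Function.iterate_succ_apply, aStep_natCast, ih (n / 10) hlt,
        foldl_min_comm, pyDigitVal_digitChar _ hm, min_comm]

lemma toDigits_val_le (n : Nat) : ∀ c ∈ Nat.toDigits 10 n, pyDigitVal c ≤ 9 := by
  induction n using Nat.strong_induction_on with
  | _ n ih =>
    intro c hc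
    by_cases h : n < 10
    · rw [toDigits_small n h] at hc
      simp at hc
      rw [hc, pyDigitVal_digitChar n h]
      omega
    · rw [toDigits_step n (by omega)] at hc
      rcases List.mem_append.1 hc with h1 | h2
      · exact ih (n / 10) (Nat.div_lt_self (by omega) (by omega)) c h1
      · simp at h2
        rw [h2, pyDigitVal_digitChar _ (Nat.mod_lt _ (by omega))]
        have := Nat.mod_lt n (show 0 < 10 by omega)
        omega

lemma toDigits_ne_nil (n : Nat) : Nat.toDigits 10 n ≠ [] := by
  by_cases h : n < 10
  · rw [toDigits_small n h]; simp
  · rw [toDigits_step n (by omega)]; simp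

-- ===== VERDICT (by name: the statement is the Claim_ definition above) =====
theorem min_digit_spec : Claim_equal_min_digit := by
  intro x _dom hpre
  unfold Spec_min_digit
  obtain ⟨n, rfl⟩ := Int.eq_ofNat_of_zero_le hpre
  have hchars : PySem.Int.toChars (n : Int) = Nat.toDigits 10 n := by
    unfold PySem.Int.toChars
    rw [if_neg (by omega)]
    simp
  rw [min_digit_eq_iterate, min_digit_alt.eq_1, hchars, loop_min]
  obtain ⟨c, cs, hl⟩ := List.exists_cons_of_ne_nil (toDigits_ne_nil n)
  rw [hl]
  simp only [List.map_cons, List.foldl_cons, min?_cons, Option.getD_some]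
  have hle : pyDigitVal c ≤ 9 := toDigits_val_le n c (by rw [hl]; simp)
  rw [min_comm, min_eq_left (by omega)]
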